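-- pv_equiv track=rewrite | github.com/giorgianb/delphi | pdf-extraction/process.py | break_text_by_nonalpha
-- ===== SOURCE A (Python) =====
-- def break_text_by_nonalpha(ct):
--     groups = []
--     current_group = [None, []]
--     for c in ct:
--         if not c.isalpha():
--             if current_group != [None, []]:
--                 groups.append([current_group[0], "".join(current_group[1])])
--
--             current_group = [c, []]
--         else:
--             current_group[1].append(c)
--
--     groups.append([current_group[0], "".join(current_group[1])])
--     return groups
-- ===== SOURCE B (Python) =====
-- def break_text_by_nonalpha(ct):
--     n = len(ct)
--     groups = []
--     i = 0
--     while i < n and ct[i].isalpha():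
--         i += 1
--     if n == 0 or ct[0].isalpha():
--         groups.append([None, "".join(ct[:i])])
--     while i < n:
--         delim = ct[i]
--         i += 1
--         start = i
--         while i < n and ct[i].isalpha():
--             i += 1
--         groups.append([delim, "".join(ct[start:i])])
--     return groups
-- ===== Notes on version B (the rewrite author's own statement) =====
-- stated objective: alternative
-- what changed: B scans by index, slicing out the leading alpha run and then one (delimiter, run) slice per boundary, instead of A's per-character fold that grows a list accumulator and compares it against a [None, []] sentinel.
import Mathlib
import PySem

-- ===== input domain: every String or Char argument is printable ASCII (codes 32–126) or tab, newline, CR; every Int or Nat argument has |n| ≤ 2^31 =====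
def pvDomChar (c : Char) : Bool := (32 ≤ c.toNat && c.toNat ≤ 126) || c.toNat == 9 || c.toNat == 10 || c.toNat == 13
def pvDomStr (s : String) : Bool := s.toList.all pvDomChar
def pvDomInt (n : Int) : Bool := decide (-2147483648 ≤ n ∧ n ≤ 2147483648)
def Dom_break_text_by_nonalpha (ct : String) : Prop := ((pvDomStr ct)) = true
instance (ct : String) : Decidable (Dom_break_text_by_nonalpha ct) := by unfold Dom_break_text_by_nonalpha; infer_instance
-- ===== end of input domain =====

-- B replaces A's per-character fold (list accumulator + [None, []] sentinel comparison) by an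
-- index scan that slices out the leading alpha run and one (delimiter, run) slice per boundary.


-- ===== PORT A =====
-- state: (groups so far, current_group = (delimiter, reversed-free char list))
def pvAStep (st : List (Option String × String) × (Option String × List Char)) (c : Char) :
    List (Option String × String) × (Option String × List Char) :=
  if ¬ PySem.Chars.isalpha c then
    let groups :=
      if st.2 ≠ ((none : Option String), ([] : List Char)) then
        st.1 ++ [(st.2.1, String.mk st.2.2)]
      else st.1
    (groups, (some (String.mk [c]), []))
  else
    (st.1, (st.2.1, st.2.2 ++ [c]))

def break_text_by_nonalpha (ct : String) : List (Option String × String) :=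
  let st := ct.toList.foldl pvAStep ([], (none, []))
  st.1 ++ [(st.2.1, String.mk st.2.2)]

-- ===== PORT B =====
-- the second while loop of Source B: at each step consume one delimiter and its following alpha run
def pvAltLoop : List Char → List (Option String × String)
  | [] => []
  | d :: rest =>
      (some (String.mk [d]), String.mk (rest.takeWhile PySem.Chars.isalpha)) ::
        pvAltLoop (rest.dropWhile PySem.Chars.isalpha)
termination_by l => l.length
decreasing_by
  simpa using Nat.lt_succ_of_le (List.length_dropWhile_le _ _)

def break_text_by_nonalpha_alt (ct : String) : List (Option String × String) :=
  let l := ct.toList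
  let run := l.takeWhile PySem.Chars.isalpha        -- the first while loop: i = length of leading run
  let headOk := match l with                        -- n == 0 or ct[0].isalpha()
    | [] => true
    | c :: _ => PySem.Chars.isalpha c
  (if headOk then [((none : Option String), String.mk run)] else []) ++
    pvAltLoop (l.dropWhile PySem.Chars.isalpha)

-- ===== PRECONDITION & SPEC =====
def Spec_break_text_by_nonalpha (ct : String) (out : List (Option String × String)) : Prop := out = break_text_by_nonalpha_alt ct
instance (ct : String) (out : List (Option String × String)) : Decidable (Spec_break_text_by_nonalpha ct out) := by unfold Spec_break_text_by_nonalpha; infer_instance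

-- ===== CLAIM (what is proved, stated in full; the proofs are below) =====
def Claim_equal_break_text_by_nonalpha : Prop := ∀ (ct : String), Dom_break_text_by_nonalpha ct → Spec_break_text_by_nonalpha ct (break_text_by_nonalpha ct)

-- ===== LEMMAS AND PROOFS =====

-- what A's remaining run produces from state (d, acc) on input l
def pvF (d : Option String) (acc : List Char) : List Char → List (Option String × String)
  | [] => [(d, String.mk acc)]
  | c :: t =>
      if PySem.Chars.isalpha c then pvF d (acc ++ [c]) t
      else
        (if (d, acc) ≠ ((none : Option String), ([] : List Char)) then [(d, String.mk acc)] else []) ++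
          pvF (some (String.mk [c])) [] t

theorem pvFold_eq_F (l : List Char) : ∀ (g : List (Option String × String)) (d : Option String) (acc : List Char),
    (let st := l.foldl pvAStep (g, (d, acc)); st.1 ++ [(st.2.1, String.mk st.2.2)]) = g ++ pvF d acc l := by
  induction l with
  | nil => intro g d acc; simp [pvF]
  | cons c t ih =>
      intro g d acc
      by_cases h : PySem.Chars.isalpha c
      · simpa [pvAStep, pvF, h] using ih g d (acc ++ [c])
      · by_cases h2 : (d, acc) = ((none : Option String), ([] : List Char))
        · simpa [pvAStep, pvF, h, h2] using ih g (some (String.mk [c])) []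
        · simpa [pvAStep, pvF, h, h2] using ih (g ++ [(d, String.mk acc)]) (some (String.mk [c])) []

theorem pvF_ne_sentinel (l : List Char) : ∀ (d : Option String) (acc : List Char),
    (d ≠ none ∨ acc ≠ []) →
    pvF d acc l = (d, String.mk (acc ++ l.takeWhile PySem.Chars.isalpha)) ::
      pvAltLoop (l.dropWhile PySem.Chars.isalpha) := by
  induction l with
  | nil => intro d acc _; simp [pvF, pvAltLoop]
  | cons c t ih =>
      intro d acc hne
      by_cases h : PySem.Chars.isalpha c
      · simpa [pvF, h, List.takeWhile_cons, List.dropWhile_cons] using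
          ih d (acc ++ [c]) (Or.inr (by simp))
      · have hsent : (d, acc) ≠ ((none : Option String), ([] : List Char)) := by
          rcases hne with h' | h' <;> simp [Prod.ext_iff, h']
        have hrec := ih (some (String.mk [c])) [] (Or.inl (by simp))
        simp only [pvF, if_neg h, if_pos hsent]
        rw [hrec]
        simp [pvAltLoop, h]

theorem pvF_start (l : List Char) :
    pvF none [] l =
      (if (match l with | [] => true | c :: _ => PySem.Chars.isalpha c) = true
       then [((none : Option String), String.mk (l.takeWhile PySem.Chars.isalpha))] else []) ++
        pvAltLoop (l.dropWhile PySem.Chars.isalpha) := by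
  cases l with
  | nil => simp [pvF, pvAltLoop]
  | cons c t =>
      by_cases h : PySem.Chars.isalpha c
      · have := pvF_ne_sentinel t (none : Option String) [c] (Or.inr (by simp))
        simp [pvF, h, this]
      · have := pvF_ne_sentinel t (some (String.mk [c])) [] (Or.inl (by simp))
        simp [pvF, h, pvAltLoop, this]

-- ===== VERDICT (by name: the statement is the Claim_ definition above) =====
theorem break_text_by_nonalpha_spec : Claim_equal_break_text_by_nonalpha := by
  intro ct _
  show break_text_by_nonalpha ct = break_text_by_nonalpha_alt ct
  have h1 := pvFold_eq_F ct.toList [] (none : Option String) []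
  simp only [break_text_by_nonalpha, h1, List.nil_append, pvF_start ct.toList,
    break_text_by_nonalpha_alt]
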